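-- pv_equiv track=rewrite | github.com/pts/pi | fast_pibc.py | numdigits
-- ===== SOURCE A (Python) =====
-- def numdigits(v):
--   n = 1
--   while v > 9:
--     a = b = 1
--     pa = pb = 10
--     while v > pb:
--       a = b
--       pa = pb
--       pb *= pb
--       b *= 2
--     v //= pa
--     n += a
--   return n
-- ===== SOURCE B (Python) =====
-- def numdigits(v):
--     if v <= 9:
--         return 1
--     e = (v.bit_length() * 1233) >> 12
--     return e + (1 if v >= 10 ** e else 0)
-- ===== Notes on version B (the rewrite author's own statement) =====
-- stated objective: alternative
-- what changed: Replaces A's nested digit-stripping loop (repeated squaring of powers of ten, then big divisions) with a loop-free bit_length-based log-ten estimate corrected by a single power-of-ten comparison.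
import Mathlib
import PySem

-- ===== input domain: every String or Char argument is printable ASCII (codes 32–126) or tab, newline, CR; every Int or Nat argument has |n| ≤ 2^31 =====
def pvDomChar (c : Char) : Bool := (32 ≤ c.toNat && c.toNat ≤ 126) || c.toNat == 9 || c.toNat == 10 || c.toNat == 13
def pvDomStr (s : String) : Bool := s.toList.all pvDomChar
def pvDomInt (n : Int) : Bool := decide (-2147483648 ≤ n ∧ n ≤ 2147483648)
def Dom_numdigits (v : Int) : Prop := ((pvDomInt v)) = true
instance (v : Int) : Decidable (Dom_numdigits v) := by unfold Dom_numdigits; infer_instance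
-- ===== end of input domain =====

-- B replaces A's nested repeated-squaring digit-stripping loop by a loop-free bit_length-based log-ten estimate plus one power-of-ten comparison correction (alternative algorithm).


-- ===== PORT A =====
theorem pv_two_le_ten : (2:Int) ≤ 10 := by norm_num

-- tiny facts used only by the termination arguments of the loops below
theorem pv_lt_sq (pb : Int) (h : 2 ≤ pb) : pb < pb * pb :=
  lt_of_lt_of_le (lt_two_mul_self (zero_lt_two.trans_le h))
    (mul_le_mul_of_nonneg_right h (zero_lt_two.trans_le h).le)

theorem pv_two_le_sq (pb : Int) (h : 2 ≤ pb) : 2 ≤ pb * pb :=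
  le_trans h (pv_lt_sq pb h).le

theorem pv_inner_meas (v pb : Int) (h : 2 ≤ pb) (hg : v > pb) :
    (v - pb * pb).toNat < (v - pb).toNat :=
  (Int.toNat_lt_toNat (sub_pos.mpr hg)).mpr (sub_lt_sub_left (pv_lt_sq pb h) v)

theorem pv_div_lt (x d : Int) (hx : 0 < x) (hd : 2 ≤ d) : x / d < x := by
  have hx0 : x = (x.toNat : Int) := (Int.toNat_of_nonneg hx.le).symm
  have hd0 : d = (d.toNat : Int) := (Int.toNat_of_nonneg (zero_lt_two.trans_le hd).le).symm
  rw [hx0, hd0, ← Int.natCast_div]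
  exact_mod_cast Nat.div_lt_self (Int.lt_toNat.mpr hx) (Int.lt_toNat.mpr (one_lt_two.trans_le hd))

theorem pv_nine_pos : (0:Int) < 9 := by norm_num

theorem pv_two_le_of_ten_le (d : Int) (hd : 10 ≤ d) : 2 ≤ d := le_trans (by norm_num) hd

theorem pv_outer_meas (v d : Int) (hg : v > 9) (hd : 10 ≤ d) :
    (PySem.Int.floordiv v d).toNat < v.toNat := by
  rw [PySem.Int.floordiv_eq_ediv_of_pos (zero_lt_two.trans_le (pv_two_le_of_ten_le d hd))]
  exact (Int.toNat_lt_toNat (pv_nine_pos.trans hg)).mpr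
    (pv_div_lt v d (pv_nine_pos.trans hg) (pv_two_le_of_ten_le d hd))

-- inner while loop of A; the proof argument `2 ≤ pb` only serves termination and carries no computation
def pvInner (v a b pa pb : Int) (h : 2 ≤ pb) : Int × Int :=
  if hg : v > pb then
    pvInner v b (b * 2) pb (pb * pb) (pv_two_le_sq pb h)
  else
    (a, pa)
termination_by (v - pb).toNat
decreasing_by exact pv_inner_meas v pb h hg

-- the pa returned by the inner loop only grows, so it stays ≥ 10 (used by the outer loop's termination)
theorem pvInner_snd_ge (v a b pa pb : Int) (h : 2 ≤ pb) (hpa : 10 ≤ pa) (hle : pa ≤ pb) :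
    10 ≤ (pvInner v a b pa pb h).2 := by
  unfold pvInner
  split
  · exact pvInner_snd_ge v b (b * 2) pb (pb * pb) _ (le_trans hpa hle) (pv_lt_sq pb h).le
  · exact hpa
termination_by (v - pb).toNat
decreasing_by
  rename_i hg
  exact pv_inner_meas v pb h hg

-- outer while loop of A
def pvOuter (v n : Int) : Int :=
  if hg : v > 9 then
    let r := pvInner v 1 1 10 10 pv_two_le_ten
    pvOuter (PySem.Int.floordiv v r.2) (n + r.1)
  else
    n
termination_by v.toNat
decreasing_by
  exact pv_outer_meas v _ hg
    (pvInner_snd_ge v 1 1 10 10 pv_two_le_ten (le_refl 10) (le_refl 10))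

def numdigits (v : Int) : Int := pvOuter v 1

-- ===== PORT B =====
-- loop-free: e = (v.bit_length() * 1233) >> 12, then one comparison with 10**e
def numdigits_alt (v : Int) : Int :=
  if v ≤ 9 then 1
  else
    let e : Nat := (PySem.Int.bitLength v * 1233) >>> 12
    (e : Int) + (if v ≥ 10 ^ e then 1 else 0)

-- ===== PRECONDITION & SPEC =====
def Spec_numdigits (v : Int) (out : Int) : Prop := out = numdigits_alt v
instance (v : Int) (out : Int) : Decidable (Spec_numdigits v out) := by unfold Spec_numdigits; infer_instance

-- ===== CLAIM =====
def Claim_equal_numdigits : Prop := ∀ (v : Int), Dom_numdigits v → Spec_numdigits v (numdigits v)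

-- ===== LEMMAS AND PROOFS =====

theorem pv_log_div_pow (n k : Nat) : Nat.log 10 (n / 10 ^ k) = Nat.log 10 n - k := by
  induction k generalizing n with
  | zero => simp
  | succ k ih =>
    rw [pow_succ, ← Nat.div_div_eq_div_mul, Nat.log_div_base, ih]
    omega

theorem pv_toNat_floordiv (v d : Int) (hv : 0 ≤ v) (hd : 0 < d) :
    (PySem.Int.floordiv v d).toNat = v.toNat / d.toNat := by
  have : PySem.Int.floordiv v d = ((v.toNat / d.toNat : Nat) : Int) := by
    rw [PySem.Int.floordiv_eq_ediv_of_pos hd, Int.natCast_div]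
    congr 1 <;> omega
  rw [this, Int.toNat_natCast]

theorem pvInner_spec (v a b pa pb : Int) (h : 2 ≤ pb) :
    1 ≤ a → 1 ≤ b → pa = (10:Int) ^ a.toNat → pb = (10:Int) ^ b.toNat → pa ≤ v →
    1 ≤ (pvInner v a b pa pb h).1 ∧
    (pvInner v a b pa pb h).2 = (10:Int) ^ ((pvInner v a b pa pb h).1).toNat ∧
    (pvInner v a b pa pb h).2 ≤ v := by
  induction a, b, pa, pb, h using pvInner.induct v with
  | case1 a b pa pb h hgt ih =>
    intro ha hb hpb hpb2 hle
    rw [pvInner, dif_pos hgt]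
    refine ih hb (by omega) hpb2 ?_ (by omega)
    rw [hpb2, ← pow_add]
    congr 1
    omega
  | case2 a b pa pb h hng =>
    intro ha hb hpa hpb hle
    rw [pvInner, dif_neg hng]
    exact ⟨ha, hpa, hle⟩

theorem pvOuter_eq_log (v n : Int) : pvOuter v n = n + (Nat.log 10 v.toNat : Int) := by
  induction v, n using pvOuter.induct with
  | case1 v n hg r ih =>
    rw [pvOuter, dif_pos hg]
    have hspec := pvInner_spec v 1 1 10 10 pv_two_le_ten (by norm_num) (by norm_num)
      (by norm_num) (by norm_num) (by omega)
    obtain ⟨h1, h2, h3⟩ := hspec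
    show pvOuter (PySem.Int.floordiv v (pvInner v 1 1 10 10 pv_two_le_ten).2)
        (n + (pvInner v 1 1 10 10 pv_two_le_ten).1) = _
    set q := pvInner v 1 1 10 10 pv_two_le_ten with hq
    set k := (q.1).toNat with hk
    rw [ih, pv_toNat_floordiv v q.2 (by omega) (by rw [h2]; positivity)]
    have hq2nat : (q.2).toNat = 10 ^ k := by
      rw [h2, show ((10:Int)) ^ k = ((10 ^ k : Nat) : Int) by push_cast; rfl,
        Int.toNat_natCast]
    rw [hq2nat, pv_log_div_pow]
    have hkle : k ≤ Nat.log 10 v.toNat := by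
      refine (Nat.le_log_iff_pow_le (by norm_num) (by omega : v.toNat ≠ 0)).mpr ?_
      have hc : ((10 ^ k : Nat) : Int) ≤ ((v.toNat : Nat) : Int) := by
        rw [show ((10 ^ k : Nat) : Int) = q.2 by rw [h2]; push_cast; rfl]
        omega
      exact_mod_cast hc
    have hq1 : q.1 = (k : Int) := by omega
    rw [hq1]
    omega
  | case2 v n hg =>
    rw [pvOuter, dif_neg hg]
    have : Nat.log 10 v.toNat = 0 := Nat.log_eq_zero_iff.mpr (Or.inl (by omega))
    omega

-- correction step: an estimate e bracketed by 10^(e-1) ≤ n < 10^(e+1) plus one comparison gives 1 + log10 n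
theorem pv_key (n e : Nat) (he : 1 ≤ e) (hlo : 10 ^ (e - 1) ≤ n) (hhi : n < 10 ^ (e + 1)) :
    ((e : Int) + if (n : Int) ≥ 10 ^ e then 1 else 0) = 1 + (Nat.log 10 n : Int) := by
  split
  · rename_i h
    have h10 : 10 ^ e ≤ n := by exact_mod_cast h
    rw [Nat.log_eq_of_pow_le_of_lt_pow h10 hhi]
    push_cast; ring
  · rename_i h
    have h10 : n < 10 ^ e := by
      have : ¬ (10:Int) ^ e ≤ (n : Int) := h
      exact_mod_cast not_le.mp this
    rw [Nat.log_eq_of_pow_le_of_lt_pow hlo (by rwa [Nat.sub_add_cancel he])]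
    have : (((e - 1 : Nat)) : Int) = (e : Int) - 1 := by omega
    omega

theorem pv_alt_eq_log (v : Int) (h9 : 9 < v) (hle : v ≤ 2147483648) :
    numdigits_alt v = 1 + (Nat.log 10 v.toNat : Int) := by
  have hne : v ≠ 0 := by omega
  have h1 := PySem.Int.two_pow_bitLength_le v hne
  have h2 := PySem.Int.lt_two_pow_bitLength v
  have hna : v.natAbs = v.toNat := by omega
  rw [hna] at h1 h2
  have hvn : v = ((v.toNat : Nat) : Int) := by omega
  set n := v.toNat with hn
  set k := PySem.Int.bitLength v with hk
  have h10n : 10 ≤ n := by omega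
  have hn31 : n ≤ 2 ^ 31 := by omega
  have hk4 : 4 ≤ k := by
    by_contra hc
    have : 2 ^ k ≤ 2 ^ 3 := Nat.pow_le_pow_right (by norm_num) (by omega)
    have := lt_of_lt_of_le h2 this
    norm_num at this
    omega
  have hk32 : k ≤ 32 := by
    by_contra hc
    have : 2 ^ 32 ≤ 2 ^ (k - 1) := Nat.pow_le_pow_right (by norm_num) (by omega)
    have := le_trans this h1
    have h32 : (2:Nat) ^ 32 = 4294967296 := by norm_num
    have h31 : (2:Nat) ^ 31 = 2147483648 := by norm_num
    omega
  unfold numdigits_alt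
  rw [if_neg (by omega), ← hk, hvn]
  clear_value k
  interval_cases k <;>
    exact pv_key n _ (by decide)
      (le_trans (by decide) h1) (lt_of_lt_of_le h2 (by decide))

-- ===== VERDICT =====
theorem numdigits_spec : Claim_equal_numdigits := by
  intro v hd
  unfold Spec_numdigits
  by_cases hv : v ≤ 9
  · unfold numdigits numdigits_alt pvOuter
    rw [dif_neg (by omega), if_pos hv]
  · have hdom : v ≤ 2147483648 := by
      unfold Dom_numdigits pvDomInt at hd
      simpa using (of_decide_eq_true hd).2
    rw [numdigits, pvOuter_eq_log, pv_alt_eq_log v (by omega) hdom]
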